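-- pv_equiv track=rewrite | github.com/MattTitmas/InfoTheory | lempel-ziv-MacKay.py | lempel_ziv_decode
-- ===== SOURCE A (Python) =====
-- def lempel_ziv_decode(to_decode: str) -> str:
--     pointers = {
--         "": '',
--         "1": to_decode[0]
--     }
--     # "" instead of "0" as .lstrip(0) changes "0" to ""
--
--     decoded_word = to_decode[0]
--
--     current_word = ''
--     current_length = 2
--     words_added_at_current_length = 0
--     current_index = 2
--     for char in to_decode[1:]:
--         current_word += char
--         if len(current_word) == current_length:
--             code_word = pointers[current_word[:-1].lstrip('0')] + current_word[-1]
--             pointers[bin(current_index)[2:]] = code_word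
--
--             decoded_word += code_word
--             current_index += 1
--             current_word = ""
--             words_added_at_current_length += 1
--             if words_added_at_current_length == (2 ** (current_length - 2)):
--                 words_added_at_current_length = 0
--                 current_length += 1
--     return decoded_word + pointers[current_word.lstrip('0')]
-- ===== SOURCE B (Python) =====
-- def lempel_ziv_decode(to_decode: str) -> str:
--     # Integer-indexed phrase list instead of a dict keyed by stripped binary strings;
--     # positional block scan instead of a char-by-char accumulator.
--     dictionary = ['', to_decode[0]]
--     out = [to_decode[0]]
--     i = 1
--     n = len(to_decode)
--     while True:
--         width = (len(dictionary) - 1).bit_length()  # pointer bits of the next block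
--         if n - i <= width:  # trailing (possibly empty) incomplete block
--             tail = to_decode[i:]
--             out.append(dictionary[int(tail, 2)] if tail else dictionary[0])
--             return ''.join(out)
--         phrase = dictionary[int(to_decode[i:i + width], 2)] + to_decode[i + width]
--         dictionary.append(phrase)
--         out.append(phrase)
--         i += width + 1
-- ===== Notes on version B (the rewrite author's own statement) =====
-- stated objective: alternative
-- what changed: Replaces the dict keyed by zero-stripped binary strings and the char-by-char block accumulator with an integer-indexed phrase list and a positional scan that reads each pointer field with int(bits, 2), the field width computed by bit_length.
import Mathlib
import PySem

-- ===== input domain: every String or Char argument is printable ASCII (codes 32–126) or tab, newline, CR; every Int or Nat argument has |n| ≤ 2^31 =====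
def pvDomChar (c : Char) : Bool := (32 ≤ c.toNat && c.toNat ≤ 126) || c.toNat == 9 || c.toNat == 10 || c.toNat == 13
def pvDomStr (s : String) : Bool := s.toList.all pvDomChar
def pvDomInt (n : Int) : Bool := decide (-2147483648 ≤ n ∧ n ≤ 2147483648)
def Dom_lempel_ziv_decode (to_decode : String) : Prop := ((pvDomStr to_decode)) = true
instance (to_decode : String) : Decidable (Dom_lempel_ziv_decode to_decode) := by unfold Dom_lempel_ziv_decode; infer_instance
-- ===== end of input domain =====

-- B re-implements A's dict-of-binary-strings LZ decoder with an integer-indexed phrase list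
-- and a positional block scan (objective: alternative/idiomatic; same value wherever A returns).

-- ===== PORT A =====
-- s.lstrip('0') on a list of chars (exact: drops leading '0' characters)
def pvLstrip0 (cs : List Char) : List Char := cs.dropWhile (· == '0')

-- bin(n)[2:] for n ≥ 1 (A only applies it to current_index ≥ 2)
def pvBin (n : Nat) : List Char :=
  if n = 0 then []
  else pvBin (n / 2) ++ [if n % 2 = 1 then '1' else '0']
decreasing_by exact Nat.div_lt_self (Nat.pos_of_ne_zero (by assumption)) (by omega)

structure AState where
  ptrs    : PySem.Dict (List Char) (List Char)
  decoded : List Char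
  cur     : List Char
  clen    : Nat
  words   : Nat
  idx     : Nat
deriving Repr

-- one iteration of A's `for char in to_decode[1:]` loop
def aStep (s : AState) (c : Char) : AState :=
  let cur := s.cur ++ [c]
  if cur.length = s.clen then
    -- pointers[current_word[:-1].lstrip('0')] + current_word[-1]
    -- (a missing key raises KeyError in Python: Pre_ guarantees presence; getD [] is the total form)
    let code := s.ptrs.getD (pvLstrip0 cur.dropLast) [] ++ [PySem.List.pyGetD cur (-1) ' ']
    { ptrs    := s.ptrs.insert (pvBin s.idx) code
      decoded := s.decoded ++ code
      cur     := []
      clen    := if s.words + 1 = 2 ^ (s.clen - 2) then s.clen + 1 else s.clen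
      words   := if s.words + 1 = 2 ^ (s.clen - 2) then 0 else s.words + 1
      idx     := s.idx + 1 }
  else { s with cur := cur }

def lempel_ziv_decode (to_decode : String) : String :=
  match to_decode.toList with
  | [] => ""      -- Python raises IndexError on to_decode[0] here (outside Pre_)
  | c0 :: rest =>
    let init : AState :=
      { ptrs := PySem.Dict.ofList [(([] : List Char), ([] : List Char)), (['1'], [c0])]
        decoded := [c0], cur := [], clen := 2, words := 0, idx := 2 }
    let fin := rest.foldl aStep init
    -- return decoded_word + pointers[current_word.lstrip('0')]
    String.ofList (fin.decoded ++ fin.ptrs.getD (pvLstrip0 fin.cur) [])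

-- ===== PORT B =====
-- int(cs, 2) on a string of '0'/'1' chars (exact there; Source B raises ValueError elsewhere, outside Pre_)
def pvBitsVal (cs : List Char) : Nat := cs.foldl (fun a c => 2 * a + (if c == '1' then 1 else 0)) 0

-- Source B's while-loop: integer-indexed list of phrases, positional scan of the remaining bits
def pvBLoop (dict : List (List Char)) (rest : List Char) : List Char :=
  let width := (PySem.Int.bitLength ((dict.length - 1 : Nat) : Int))
  if _h : rest.length ≤ width then
    dict.getD (pvBitsVal rest) []       -- trailing incomplete block (empty tail reads index 0)
  else
    let phrase := dict.getD (pvBitsVal (rest.take width)) [] ++ [rest.getD width ' ']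
    phrase ++ pvBLoop (dict ++ [phrase]) (rest.drop (width + 1))
termination_by rest.length
decreasing_by simp only [List.length_drop]; omega

def lempel_ziv_decode_alt (to_decode : String) : String :=
  match to_decode.toList with
  | [] => ""      -- Python raises IndexError on to_decode[0] here (outside Pre_)
  | c0 :: rest => String.ofList (c0 :: pvBLoop [[], [c0]] rest)

-- ===== PRECONDITION & SPEC =====
def pvIsBin (c : Char) : Bool := c == '0' || c == '1'

-- |n|.bit_length()
def pvBL (m : Nat) : Nat := PySem.Int.bitLength (m : Int)

-- start position (in to_decode[1:]) of the block defining phrase number k + j: the explicit sum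
-- of the widths pvBL(i-1)+1 of the blocks for phrases i = k .. k+j-1
def pvStartFrom (k j : Nat) : Nat := ((List.range j).map (fun i => pvBL (k + i - 1) + 1)).sum

-- block j (complete, or the trailing incomplete one) is made of '0'/'1' and its pointer value
-- is an index below the number of phrases defined before it
def pvFieldOkFrom (k : Nat) (rest : List Char) (j : Nat) : Bool :=
  if pvStartFrom k j + pvBL (k + j - 1) + 1 ≤ rest.length then
    ((rest.drop (pvStartFrom k j)).take (pvBL (k + j - 1))).all pvIsBin
      && decide (pvBitsVal ((rest.drop (pvStartFrom k j)).take (pvBL (k + j - 1))) < k + j)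
  else if pvStartFrom k j ≤ rest.length then
    (rest.drop (pvStartFrom k j)).all pvIsBin && decide (pvBitsVal (rest.drop (pvStartFrom k j)) < k + j)
  else true

def pvValid (k : Nat) (rest : List Char) : Bool :=
  (List.range (rest.length + 1)).all (pvFieldOkFrom k rest)

-- Pre_ = exactly the inputs on which A returns: a non-empty string whose pointer fields (block
-- positions and widths depend only on position, per the schedule above) are in-range binary
-- numerals; elsewhere A raises IndexError (empty input) or KeyError (a pointer field that is
-- not a key of `pointers`).
def Pre_lempel_ziv_decode (to_decode : String) : Prop :=
  to_decode.toList ≠ [] ∧ pvValid 2 to_decode.toList.tail = true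
instance (to_decode : String) : Decidable (Pre_lempel_ziv_decode to_decode) := by
  unfold Pre_lempel_ziv_decode; infer_instance

def pvWitness_lempel_ziv_decode : String := "10110"

def Spec_lempel_ziv_decode (to_decode : String) (out : String) : Prop := out = lempel_ziv_decode_alt to_decode
instance (to_decode : String) (out : String) : Decidable (Spec_lempel_ziv_decode to_decode out) := by unfold Spec_lempel_ziv_decode; infer_instance

-- ===== CLAIM (what is proved, stated in full; the proofs are below) =====
def Claim_equal_lempel_ziv_decode : Prop := ∀ (to_decode : String), Dom_lempel_ziv_decode to_decode → Pre_lempel_ziv_decode to_decode → Spec_lempel_ziv_decode to_decode (lempel_ziv_decode to_decode)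

-- ===== LEMMAS AND PROOFS =====

def pvBinChar (c : Char) : Prop := c = '0' ∨ c = '1'

lemma pvBin_pos {n : Nat} (h : n ≠ 0) :
    pvBin n = pvBin (n / 2) ++ [if n % 2 = 1 then '1' else '0'] := by
  rw [pvBin]; simp [h]

lemma pvBin_foldl (cs : List Char) (hb : ∀ c ∈ cs, pvBinChar c) :
    ∀ acc : Nat, acc ≠ 0 →
    pvBin (cs.foldl (fun a c => 2 * a + (if c == '1' then 1 else 0)) acc) = pvBin acc ++ cs := by
  induction cs with
  | nil => intro acc _; simp
  | cons c cs ih =>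
    intro acc hacc
    have hc := hb c (by simp)
    have hrest : ∀ x ∈ cs, pvBinChar x := fun x hx => hb x (by simp [hx])
    have hacc' : 2 * acc + (if c == '1' then 1 else 0) ≠ 0 := by
      rcases hc with h | h <;> subst h <;> simp <;> omega
    have step : pvBin (2 * acc + (if c == '1' then 1 else 0)) = pvBin acc ++ [c] := by
      rw [pvBin_pos hacc']
      rcases hc with h | h <;> subst h <;> simp <;> congr 1 <;> omega
    simp only [List.foldl_cons]
    rw [ih hrest _ hacc', step, List.append_assoc]
    rfl

lemma pvLstrip0_binary (cs : List Char) (hb : ∀ c ∈ cs, pvBinChar c) :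
    pvLstrip0 cs = pvBin (pvBitsVal cs) := by
  induction cs with
  | nil => simp [pvLstrip0, pvBitsVal, pvBin]
  | cons c cs ih =>
    have hc := hb c (by simp)
    have hrest : ∀ x ∈ cs, pvBinChar x := fun x hx => hb x (by simp [hx])
    rcases hc with h | h <;> subst h
    · simpa [pvLstrip0, pvBitsVal, List.dropWhile] using ih hrest
    · show pvLstrip0 ('1' :: cs) = _
      have : pvBitsVal ('1' :: cs) = cs.foldl (fun a c => 2 * a + (if c == '1' then 1 else 0)) 1 := by
        simp [pvBitsVal]
      rw [this, pvBin_foldl cs hrest 1 (by omega)]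
      simp [pvLstrip0, List.dropWhile]
      rw [pvBin_pos (by omega)]
      simp [pvBin]

lemma pvBin_foldl_val (n : Nat) : ∀ acc : Nat,
    (pvBin n).foldl (fun a c => 2 * a + (if c == '1' then 1 else 0)) acc
      = acc * 2 ^ (pvBin n).length + n := by
  induction n using Nat.strong_induction_on with
  | _ n ih =>
    intro acc
    by_cases h : n = 0
    · subst h; simp [pvBin]
    · rw [pvBin_pos h]
      have hlt : n / 2 < n := Nat.div_lt_self (Nat.pos_of_ne_zero h) (by omega)
      rw [List.foldl_append, ih _ hlt acc]
      simp only [List.foldl_cons, List.foldl_nil, List.length_append, List.length_singleton]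
      have h2 : n % 2 = 0 ∨ n % 2 = 1 := by omega
      rcases h2 with h2 | h2 <;> simp [h2] <;> ring_nf <;> omega

lemma pvBin_inj {a b : Nat} (h : pvBin a = pvBin b) : a = b := by
  have ha := pvBin_foldl_val a 0
  have hb := pvBin_foldl_val b 0
  rw [h] at ha
  omega

lemma pvDict_get? (ds : List (List Char)) : ∀ (off v : Nat),
    (PySem.Dict.mk ((ds.zipIdx off).map (fun p => (pvBin p.2, p.1)))).get? (pvBin v)
      = if off ≤ v ∧ v < off + ds.length then some (ds.getD (v - off) []) else none := by
  induction ds with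
  | nil => intro off v; simp [PySem.Dict.get?]
  | cons d ds ih =>
    intro off v
    rw [List.zipIdx_cons]
    simp only [List.map_cons]
    rw [PySem.Dict.get?_mk_cons]
    by_cases hov : off = v
    · subst hov
      simp
    · have : (pvBin off == pvBin v) = false := by
        simp only [beq_eq_false_iff_ne, ne_eq]
        intro hc; exact hov (pvBin_inj hc)
      rw [this]
      simp only [Bool.false_eq_true, if_false]
      rw [ih (off + 1) v]
      by_cases h1 : off + 1 ≤ v ∧ v < off + 1 + ds.length
      · rw [if_pos h1, if_pos (by have hlen : (d :: ds).length = ds.length + 1 := rfl; omega)]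
        have : v - off = (v - (off + 1)) + 1 := by omega
        rw [this]
        simp
      · have h2 : ¬ (off ≤ v ∧ v < off + (d :: ds).length) := by
          have hlen : (d :: ds).length = ds.length + 1 := rfl
          omega
        rw [if_neg h1, if_neg h2]

lemma pvBL_bounds {m : Nat} (hm : m ≠ 0) : 2 ^ (pvBL m - 1) ≤ m ∧ m < 2 ^ pvBL m ∧ 1 ≤ pvBL m := by
  have h1 := PySem.Int.lt_two_pow_bitLength (m : Int)
  have h2 := PySem.Int.two_pow_bitLength_le (n := (m : Int)) (by exact_mod_cast hm)
  simp only [Int.natAbs_natCast] at h1 h2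
  refine ⟨h2, h1, ?_⟩
  unfold pvBL
  by_contra h
  have h0 : PySem.Int.bitLength (m : Int) = 0 := by omega
  rw [h0] at h1
  simp at h1
  omega

lemma pvBL_eq {m t : Nat} (h1 : 2 ^ (t - 1) ≤ m) (h2 : m < 2 ^ t) (ht : 1 ≤ t) :
    pvBL m = t := by
  have hm : m ≠ 0 := by have : 0 < 2 ^ (t - 1) := Nat.two_pow_pos _; omega
  obtain ⟨b1, b2, b3⟩ := pvBL_bounds hm
  have ha : t - 1 < pvBL m := by
    have := Nat.lt_of_le_of_lt h1 b2
    exact (Nat.pow_lt_pow_iff_right (by omega)).mp this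
  have hb : pvBL m - 1 < t := by
    have := Nat.lt_of_le_of_lt b1 h2
    exact (Nat.pow_lt_pow_iff_right (by omega)).mp this
  omega

lemma pvFoldl_partial (cs : List Char) : ∀ s : AState, s.cur.length + cs.length < s.clen →
    cs.foldl aStep s = { s with cur := s.cur ++ cs } := by
  induction cs with
  | nil => intro s _; simp
  | cons c cs ih =>
    intro s hlen
    simp only [List.foldl_cons]
    have hne : (s.cur ++ [c]).length ≠ s.clen := by
      simp only [List.length_append, List.length_singleton]
      simp only [List.length_cons] at hlen
      omega
    have hstep : aStep s c = { s with cur := s.cur ++ [c] } := by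
      unfold aStep
      simp only [if_neg hne]
    rw [hstep, ih]
    · simp
    · simp only [List.length_append, List.length_singleton]
      simp only [List.length_cons] at hlen
      omega

def pvPreLoop (k : Nat) (rest : List Char) : Bool :=
  let w := (PySem.Int.bitLength ((k - 1 : Nat) : Int))
  if _h : rest.length ≤ w then
    rest.all (fun c => c == '0' || c == '1') && decide (pvBitsVal rest < k)
  else
    (rest.take w).all (fun c => c == '0' || c == '1') && decide (pvBitsVal (rest.take w) < k)
      && pvPreLoop (k + 1) (rest.drop (w + 1))
termination_by rest.length
decreasing_by simp only [List.length_drop]; omega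

def pvDictOf (dict : List (List Char)) : PySem.Dict (List Char) (List Char) :=
  PySem.Dict.mk ((dict.zipIdx 0).map (fun p => (pvBin p.2, p.1)))

def pvInv (s : AState) (dict : List (List Char)) : Prop :=
  s.cur = [] ∧ s.ptrs = pvDictOf dict ∧ s.idx = dict.length ∧ 2 ≤ dict.length ∧
  s.clen = pvBL (dict.length - 1) + 1 ∧ s.words + 2 ^ (s.clen - 2) + 1 = dict.length

theorem pvBridge (rest : List Char) (dict : List (List Char)) (s : AState)
    (hinv : pvInv s dict) (hpre : pvPreLoop dict.length rest = true) :
    (rest.foldl aStep s).decoded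
        ++ ((rest.foldl aStep s).ptrs.getD (pvLstrip0 (rest.foldl aStep s).cur) [])
      = s.decoded ++ pvBLoop dict rest := by
  obtain ⟨hcur, hptrs, hidx, hlen2, hclen, hwords⟩ := hinv
  have hk1 : dict.length - 1 ≠ 0 := by omega
  obtain ⟨hb1, hb2, hb3⟩ := pvBL_bounds hk1
  have hblrw : PySem.Int.bitLength ((dict.length - 1 : Nat) : Int) = pvBL (dict.length - 1) := rfl
  rw [pvPreLoop] at hpre
  simp only [hblrw] at hpre
  by_cases h : rest.length ≤ pvBL (dict.length - 1)
  · rw [dif_pos h] at hpre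
    simp only [Bool.and_eq_true, List.all_eq_true, beq_iff_eq, Bool.or_eq_true,
      decide_eq_true_eq] at hpre
    obtain ⟨hbin, hval⟩ := hpre
    have hunf : pvBLoop dict rest = dict.getD (pvBitsVal rest) [] := by
      rw [pvBLoop]
      rw [dif_pos (by rw [hblrw]; exact h)]
    rw [hunf]
    rw [pvFoldl_partial rest s (by rw [hcur]; simp only [List.length_nil]; omega)]
    simp only [hcur, List.nil_append]
    rw [hptrs, pvLstrip0_binary rest hbin, PySem.Dict.getD_eq_get?_getD, pvDictOf,
      pvDict_get? dict 0 (pvBitsVal rest)]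
    rw [if_pos ⟨Nat.zero_le _, by omega⟩]
    simp
  · rw [dif_neg h] at hpre
    simp only [Bool.and_eq_true, List.all_eq_true, beq_iff_eq, Bool.or_eq_true,
      decide_eq_true_eq] at hpre
    obtain ⟨⟨hbin, hval⟩, hrec⟩ := hpre
    set w := pvBL (dict.length - 1) with hw
    set c := rest.getD w ' ' with hc
    set v := pvBitsVal (rest.take w) with hv
    set code : List Char := dict.getD v [] ++ [c] with hcode
    have hwlt : w < rest.length := by omega
    have hcelem : rest[w]'hwlt = c := by
      rw [hc, List.getD_eq_getElem?_getD, List.getElem?_eq_getElem hwlt]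
      rfl
    -- decompose rest
    have hsplit : rest = (rest.take w ++ [c]) ++ rest.drop (w + 1) := by
      conv_lhs => rw [← List.take_append_drop (w + 1) rest]
      congr 1
      rw [List.take_succ, List.getElem?_eq_getElem hwlt, hcelem]
      rfl
    -- fold over the first w chars
    have hpart : (rest.take w).foldl aStep s = { s with cur := rest.take w } := by
      rw [pvFoldl_partial (rest.take w) s
        (by rw [hcur]; simp only [List.length_nil, List.length_take]; omega), hcur]
      simp
    have hlentw : (rest.take w).length = w := by simp; omega
    -- the pointer lookup made on this block
    have hlookup : s.ptrs.getD (pvLstrip0 (rest.take w)) [] = dict.getD v [] := by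
      rw [hptrs, pvLstrip0_binary _ hbin, ← hv, PySem.Dict.getD_eq_get?_getD, pvDictOf,
        pvDict_get? dict 0 v, if_pos ⟨Nat.zero_le _, by omega⟩]
      simp
    -- the block step
    have hstep : aStep { s with cur := rest.take w } c =
        { ptrs := s.ptrs.insert (pvBin s.idx) code
          decoded := s.decoded ++ code
          cur := []
          clen := if s.words + 1 = 2 ^ (s.clen - 2) then s.clen + 1 else s.clen
          words := if s.words + 1 = 2 ^ (s.clen - 2) then 0 else s.words + 1
          idx := s.idx + 1 } := by
      unfold aStep
      rw [if_pos (by simp only [List.length_append, List.length_singleton, hlentw]; omega)]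
      simp only [List.dropLast_concat, PySem.List.pyGetD_neg_one_append_singleton]
      rw [hlookup, ← hcode]
    -- the new invariant
    have hfresh : (pvDictOf dict).get? (pvBin dict.length) = none := by
      rw [pvDictOf, pvDict_get? dict 0 dict.length, if_neg (by omega)]
    have hnc : (pvDictOf dict).contains (pvBin dict.length) = false := by
      rw [PySem.Dict.contains_eq_isSome_get?, hfresh]
      rfl
    have hptrs' : s.ptrs.insert (pvBin s.idx) code = pvDictOf (dict ++ [code]) := by
      apply PySem.Dict.ext
      rw [hptrs, hidx, PySem.Dict.items_insert_of_not_contains _ _ hnc]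
      rw [pvDictOf, pvDictOf, List.zipIdx_append]
      simp
    have hinv' : pvInv
        { ptrs := s.ptrs.insert (pvBin s.idx) code
          decoded := s.decoded ++ code
          cur := []
          clen := if s.words + 1 = 2 ^ (s.clen - 2) then s.clen + 1 else s.clen
          words := if s.words + 1 = 2 ^ (s.clen - 2) then 0 else s.words + 1
          idx := s.idx + 1 } (dict ++ [code]) := by
      refine ⟨rfl, hptrs', ?_, ?_, ?_, ?_⟩
      · simp only [List.length_append, List.length_singleton, hidx]
      · simp only [List.length_append, List.length_singleton]
        omega
      · -- clen invariant
        simp only [List.length_append, List.length_singleton, Nat.add_sub_cancel]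
        by_cases htrig : s.words + 1 = 2 ^ (s.clen - 2)
        · rw [if_pos htrig]
          have hk2w : dict.length = 2 ^ w := by
            rw [hclen] at htrig hwords
            have e1 : w + 1 - 2 = w - 1 := by omega
            rw [e1] at htrig hwords
            have hww : w - 1 + 1 = w := by omega
            have h2 : 2 ^ (w - 1 + 1) = 2 ^ (w - 1) + 2 ^ (w - 1) := by ring
            rw [hww] at h2
            omega
          rw [pvBL_eq (t := w + 1) (m := dict.length)
            (by have e : w + 1 - 1 = w := by omega
                rw [e]
                exact hk2w.ge)
            (by rw [hk2w]; exact Nat.pow_lt_pow_right (by omega) (by omega))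
            (by omega)]
          rw [hclen]
        · rw [if_neg htrig]
          have hklt : dict.length < 2 ^ w := by
            rw [hclen] at htrig hwords
            have e1 : w + 1 - 2 = w - 1 := by omega
            rw [e1] at htrig hwords
            have hww : w - 1 + 1 = w := by omega
            have h2 : 2 ^ (w - 1 + 1) = 2 ^ (w - 1) + 2 ^ (w - 1) := by ring
            rw [hww] at h2
            omega
          rw [pvBL_eq (t := w) (m := dict.length)
            (by calc 2 ^ (w - 1) ≤ dict.length - 1 := hb1
                _ ≤ dict.length := by omega)
            hklt (by omega)]
          rw [hclen]
      · -- words invariant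
        by_cases htrig : s.words + 1 = 2 ^ (s.clen - 2)
        · rw [if_pos htrig, if_pos htrig]
          simp only [List.length_append, List.length_singleton]
          rw [hclen] at htrig hwords ⊢
          have e1 : w + 1 - 2 = w - 1 := by omega
          have e2 : w + 1 + 1 - 2 = w := by omega
          rw [e1] at htrig hwords
          rw [e2]
          have hww : w - 1 + 1 = w := by omega
          have h2 : 2 ^ (w - 1 + 1) = 2 ^ (w - 1) + 2 ^ (w - 1) := by ring
          rw [hww] at h2
          omega
        · rw [if_neg htrig, if_neg htrig]
          simp only [List.length_append, List.length_singleton]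
          omega
    -- one unfolding of B's loop
    have hunf : pvBLoop dict rest = code ++ pvBLoop (dict ++ [code]) (rest.drop (w + 1)) := by
      rw [pvBLoop]
      rw [dif_neg (by rw [hblrw]; exact h)]
      simp only [hblrw]
      rw [← hv, ← hc, ← hcode]
    -- recurse
    have ih := pvBridge (rest.drop (w + 1)) (dict ++ [code])
      _ hinv' (by simp only [List.length_append, List.length_singleton]; exact hrec)
    calc (rest.foldl aStep s).decoded
        ++ ((rest.foldl aStep s).ptrs.getD (pvLstrip0 (rest.foldl aStep s).cur) [])
        = ((rest.drop (w + 1)).foldl aStep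
            { ptrs := s.ptrs.insert (pvBin s.idx) code
              decoded := s.decoded ++ code
              cur := []
              clen := if s.words + 1 = 2 ^ (s.clen - 2) then s.clen + 1 else s.clen
              words := if s.words + 1 = 2 ^ (s.clen - 2) then 0 else s.words + 1
              idx := s.idx + 1 }).decoded
          ++ (((rest.drop (w + 1)).foldl aStep _).ptrs.getD
              (pvLstrip0 ((rest.drop (w + 1)).foldl aStep _).cur) []) := by
          conv_lhs => rw [hsplit]
          rw [List.foldl_append, List.foldl_append, List.foldl_cons, List.foldl_nil,
            hpart, hstep]
      _ = (s.decoded ++ code) ++ pvBLoop (dict ++ [code]) (rest.drop (w + 1)) := ih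
      _ = s.decoded ++ (code ++ pvBLoop (dict ++ [code]) (rest.drop (w + 1))) := by
          rw [List.append_assoc]
      _ = s.decoded ++ pvBLoop dict rest := by rw [hunf]
termination_by rest.length
decreasing_by simp only [List.length_drop]; omega

lemma pvStartFrom_succ (k j : Nat) :
    pvStartFrom k (j + 1) = (pvBL (k - 1) + 1) + pvStartFrom (k + 1) j := by
  unfold pvStartFrom
  rw [List.range_succ_eq_map, List.map_cons, List.sum_cons, List.map_map]
  have e0 : k + 0 - 1 = k - 1 := by omega
  have ef : ((fun i => pvBL (k + i - 1) + 1) ∘ (fun i => i + 1))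
      = (fun i => pvBL (k + 1 + i - 1) + 1) := by
    funext i
    simp only [Function.comp_apply]
    have : k + (i + 1) - 1 = k + 1 + i - 1 := by omega
    rw [this]
  rw [e0, ef]

lemma pvFieldOkFrom_shift (k j : Nat) (rest : List Char) (hk : 1 ≤ k)
    (h : pvBL (k - 1) < rest.length) :
    pvFieldOkFrom k rest (j + 1) = pvFieldOkFrom (k + 1) (rest.drop (pvBL (k - 1) + 1)) j := by
  unfold pvFieldOkFrom
  rw [pvStartFrom_succ k j]
  have hw : pvBL (k + (j + 1) - 1) = pvBL (k + 1 + j - 1) := by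
    have : k + (j + 1) - 1 = k + 1 + j - 1 := by omega
    rw [this]
  have hkj : k + (j + 1) = k + 1 + j := by omega
  have hdrop : rest.drop (pvBL (k - 1) + 1 + pvStartFrom (k + 1) j)
      = (rest.drop (pvBL (k - 1) + 1)).drop (pvStartFrom (k + 1) j) := by
    rw [List.drop_drop, Nat.add_comm]
  have hlen : (rest.drop (pvBL (k - 1) + 1)).length = rest.length - (pvBL (k - 1) + 1) := by
    simp
  rw [hw, hkj, hdrop, hlen]
  by_cases h1 : pvStartFrom (k + 1) j + pvBL (k + 1 + j - 1) + 1 ≤ rest.length - (pvBL (k - 1) + 1)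
  · rw [if_pos (by omega), if_pos h1]
  · rw [if_neg (by omega), if_neg h1]
    by_cases h2 : pvStartFrom (k + 1) j ≤ rest.length - (pvBL (k - 1) + 1)
    · rw [if_pos (by omega), if_pos h2]
    · rw [if_neg (by omega), if_neg h2]

theorem pvValid_imp (rest : List Char) (k : Nat) (hk : 2 ≤ k)
    (hv : pvValid k rest = true) : pvPreLoop k rest = true := by
  have hall := (List.all_eq_true.mp hv)
  have hblrw : PySem.Int.bitLength ((k - 1 : Nat) : Int) = pvBL (k - 1) := rfl
  rw [pvPreLoop]
  simp only [hblrw]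
  have h0 := hall 0 (by simp)
  unfold pvFieldOkFrom at h0
  have hst0 : pvStartFrom k 0 = 0 := by simp [pvStartFrom]
  have hw0 : k + 0 - 1 = k - 1 := by omega
  rw [hst0, hw0] at h0
  simp only [List.drop_zero, Nat.zero_add, Nat.add_zero] at h0
  by_cases h : rest.length ≤ pvBL (k - 1)
  · rw [dif_pos h]
    rw [if_neg (by omega), if_pos (by omega)] at h0
    simpa [pvIsBin] using h0
  · rw [dif_neg h]
    rw [if_pos (by omega)] at h0
    simp only [Bool.and_eq_true]
    refine ⟨by simpa [pvIsBin] using h0, ?_⟩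
    apply pvValid_imp _ (k + 1) (by omega)
    rw [pvValid]
    apply List.all_eq_true.mpr
    intro j hj
    rw [← pvFieldOkFrom_shift k j rest (by omega) (by omega)]
    apply hall
    simp only [List.mem_range] at hj ⊢
    simp only [List.length_drop] at hj
    omega
termination_by rest.length
decreasing_by simp only [List.length_drop]; omega


-- ===== VERDICT (by name: the statement is the Claim_ definition above) =====
theorem lempel_ziv_decode_spec : Claim_equal_lempel_ziv_decode := by
  intro td hdom hpre
  unfold Spec_lempel_ziv_decode
  obtain ⟨hne, hval⟩ := hpre
  cases hlist : td.toList with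
  | nil => exact absurd hlist hne
  | cons c0 rest =>
    rw [hlist] at hval
    simp only [List.tail_cons] at hval
    have hloop : pvPreLoop (([[], [c0]] : List (List Char)).length) rest = true :=
      pvValid_imp rest 2 (by omega) hval
    have hbin0 : pvBin 0 = [] := by rw [pvBin]; simp
    have hbin1 : pvBin 1 = ['1'] := by
      rw [pvBin_pos (by omega)]
      norm_num [hbin0]
    have hdict : PySem.Dict.ofList [(([] : List Char), ([] : List Char)), (['1'], [c0])]
        = pvDictOf [[], [c0]] := by
      unfold pvDictOf
      simp [List.zipIdx, hbin0, hbin1]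
      rfl
    have hinv : pvInv
        { ptrs := PySem.Dict.ofList [(([] : List Char), ([] : List Char)), (['1'], [c0])]
          decoded := [c0], cur := [], clen := 2, words := 0, idx := 2 } [[], [c0]] := by
      refine ⟨rfl, hdict, rfl, ?_, ?_, ?_⟩
      · show (2 : Nat) ≤ 2
        omega
      · show (2 : Nat) = pvBL (2 - 1) + 1
        decide
      · show 0 + 2 ^ ((2 : Nat) - 2) + 1 = 2
        norm_num
    have hb := pvBridge rest [[], [c0]] _ hinv hloop
    unfold lempel_ziv_decode lempel_ziv_decode_alt
    rw [hlist]
    exact congrArg String.ofList hb
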